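-- pv_equiv track=rewrite | github.com/zcarc/problem-solving | baekjoon/2231.py | findConstructor
-- ===== SOURCE A (Python) =====
-- def findConstructor(n):
--     result = 0
--
--     for i in range(n):
--         number = i
--         s = 0
--
--         while number != 0:
--             s = s + (number % 10)
--             number = number // 10
--
--         if s + i == n:
--             result = i
--             break
--
--     return result
-- ===== SOURCE B (Python) =====
-- def findConstructor(n):
--     # Count decimal digits of n; any i < n has digit sum at most 9 * d,
--     # so a constructor of n must lie in the window [n - 9*d, n).
--     d = 0
--     t = n
--     while t > 0:
--         d += 1
--         t //= 10
--     start = n - 9 * d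
--     if start < 0:
--         start = 0
--     for i in range(start, n):
--         s = 0
--         m = i
--         while m > 0:
--             s += m % 10
--             m //= 10
--         if s + i == n:
--             return i
--     return 0
-- ===== Notes on version B (the rewrite author's own statement) =====
-- stated objective: faster
-- what changed: Instead of scanning all candidates 0..n-1, B scans only the window [n - 9*digits(n), n), which provably contains every constructor of n.
import Mathlib
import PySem

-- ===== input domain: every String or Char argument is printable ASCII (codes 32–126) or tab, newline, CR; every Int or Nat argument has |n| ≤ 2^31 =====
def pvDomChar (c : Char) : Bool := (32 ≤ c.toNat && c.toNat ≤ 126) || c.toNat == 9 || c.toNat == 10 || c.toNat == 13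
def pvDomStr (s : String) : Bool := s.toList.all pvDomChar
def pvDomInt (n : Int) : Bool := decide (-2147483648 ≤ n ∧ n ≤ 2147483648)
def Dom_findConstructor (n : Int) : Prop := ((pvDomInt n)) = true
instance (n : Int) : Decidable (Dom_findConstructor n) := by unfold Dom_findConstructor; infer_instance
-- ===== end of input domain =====

-- B restricts A's scan over 0..n-1 to the window [n - 9*digits(n), n); objective: faster (asymptotic).

-- ===== PORT A =====
-- A's inner `while number != 0` loop; `number` is always ≥ 0 in A (it ranges over
-- range(n)), so the guard `0 < number` is exact there (Python diverges for number < 0).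
def pvDsA (number s : Int) : Int :=
  if _h : 0 < number then
    pvDsA (PySem.Int.floordiv number 10) (s + PySem.Int.mod number 10)
  else s
termination_by number.toNat
decreasing_by
  rw [PySem.Int.floordiv_eq_ediv_of_pos (by omega)]
  omega

-- A's `for i in range(n)` with break: first i with digitsum(i) + i == n, else result stays 0.
def pvLoopA (n : Int) : List Int → Int
  | [] => 0
  | i :: rest =>
    let s := pvDsA i 0
    if s + i = n then i else pvLoopA n rest

def findConstructor (n : Int) : Int :=
  pvLoopA n (PySem.List.pyRange 0 n 1)

-- ===== PORT B =====
-- B's digit-count loop `while t > 0`.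
def pvDcB (t d : Int) : Int :=
  if _h : 0 < t then pvDcB (PySem.Int.floordiv t 10) (d + 1) else d
termination_by t.toNat
decreasing_by
  rw [PySem.Int.floordiv_eq_ediv_of_pos (by omega)]
  omega

-- B's inner `while m > 0` digit-sum loop.
def pvDsB (m s : Int) : Int :=
  if _h : 0 < m then
    pvDsB (PySem.Int.floordiv m 10) (s + PySem.Int.mod m 10)
  else s
termination_by m.toNat
decreasing_by
  rw [PySem.Int.floordiv_eq_ediv_of_pos (by omega)]
  omega

-- B's `for i in range(start, n)` with early return, else 0.
def pvLoopB (n : Int) : List Int → Int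
  | [] => 0
  | i :: rest =>
    if pvDsB i 0 + i = n then i else pvLoopB n rest

def findConstructor_alt (n : Int) : Int :=
  let d := pvDcB n 0
  let start0 := n - 9 * d
  let start := if start0 < 0 then 0 else start0
  pvLoopB n (PySem.List.pyRange start n 1)

-- ===== PRECONDITION & SPEC =====
def Spec_findConstructor (n : Int) (out : Int) : Prop := out = findConstructor_alt n
instance (n : Int) (out : Int) : Decidable (Spec_findConstructor n out) := by unfold Spec_findConstructor; infer_instance

-- ===== CLAIM (what is proved, stated in full; the proofs are below) =====
def Claim_equal_findConstructor : Prop := ∀ (n : Int), Dom_findConstructor n → Spec_findConstructor n (findConstructor n)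

-- ===== LEMMAS AND PROOFS =====

-- The two digit-sum loops are the same recursion.
theorem pvDs_eq (m s : Int) : pvDsA m s = pvDsB m s := by
  fun_induction pvDsA m s with
  | case1 m s h ih =>
    conv_rhs => rw [pvDsB]
    simp only [dif_pos h]
    exact ih
  | case2 m s h =>
    conv_rhs => rw [pvDsB]
    simp only [dif_neg h]

-- The two scan loops agree on the same list.
theorem pvLoop_eq (n : Int) (l : List Int) : pvLoopA n l = pvLoopB n l := by
  induction l with
  | nil => rfl
  | cons i rest ih => simp [pvLoopA, pvLoopB, pvDs_eq, ih]

-- Digit-sum bound: 0 ≤ m < 10^k ⇒ digitsum(m) ≤ 9k.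
theorem pvDs_bound (k : Nat) : ∀ m s : Int, 0 ≤ m → m < (10 : Int) ^ k →
    pvDsA m s ≤ s + 9 * (k : Int) := by
  induction k with
  | zero =>
    intro m s hm hlt
    have h1 : m < 1 := by simpa using hlt
    have hz : m = 0 := by omega
    subst hz
    conv_lhs => rw [pvDsA]
    norm_num
  | succ k ih =>
    intro m s hm hlt
    rw [pvDsA]
    by_cases h : 0 < m
    · simp only [h, dif_pos]
      rw [PySem.Int.floordiv_eq_ediv_of_pos (by omega),
          PySem.Int.mod_eq_emod_of_pos (by omega)]
      have hpow : (10 : Int) ^ (k + 1) = 10 * 10 ^ k := by ring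
      have hP : (0 : Int) < 10 ^ k := by positivity
      have h1 : 0 ≤ m / 10 := by omega
      have h2 : m / 10 < (10 : Int) ^ k := by omega
      have := ih (m / 10) (s + m % 10) h1 h2
      have hmod : m % 10 ≤ 9 := by omega
      push_cast at this ⊢
      linarith
    · simp only [h, dif_neg, not_false_iff]
      have : (0 : Int) ≤ 9 * (k + 1 : Nat) := by positivity
      push_cast at this ⊢
      linarith

-- Digit-count characterisation: pvDcB t d = d + k with t < 10^k.
theorem pvDc_spec (t d : Int) (ht : 0 ≤ t) :
    ∃ k : Nat, pvDcB t d = d + (k : Int) ∧ t < (10 : Int) ^ k := by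
  fun_induction pvDcB t d with
  | case1 t d h ih =>
    have hrec : 0 ≤ PySem.Int.floordiv t 10 := by
      rw [PySem.Int.floordiv_eq_ediv_of_pos (by omega)]; omega
    obtain ⟨k, hk, hlt⟩ := ih hrec
    refine ⟨k + 1, ?_, ?_⟩
    · rw [hk]; push_cast; ring
    · rw [PySem.Int.floordiv_eq_ediv_of_pos (by omega)] at hlt
      have hP : (0 : Int) < 10 ^ k := by positivity
      have : (10 : Int) ^ (k + 1) = 10 * 10 ^ k := by ring
      omega
  | case2 t d h =>
    exact ⟨0, by simp, by omega⟩

-- Scanning a list with no match reduces to scanning the tail part.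
theorem pvLoopA_append (n : Int) (l1 l2 : List Int)
    (h : ∀ i ∈ l1, pvDsA i 0 + i ≠ n) :
    pvLoopA n (l1 ++ l2) = pvLoopA n l2 := by
  induction l1 with
  | nil => rfl
  | cons i rest ih =>
    have hi : pvDsA i 0 + i ≠ n := h i (by simp)
    simp only [List.cons_append, pvLoopA, hi]
    exact ih (fun j hj => h j (by simp [hj]))

-- ===== VERDICT (by name: the statement is the Claim_ definition above) =====
theorem findConstructor_spec : Claim_equal_findConstructor := by
  intro n _
  unfold Spec_findConstructor findConstructor
  have halt : findConstructor_alt n =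
      pvLoopB n (PySem.List.pyRange
        (if n - 9 * pvDcB n 0 < 0 then 0 else n - 9 * pvDcB n 0) n 1) := rfl
  rw [halt]
  by_cases hn : n ≤ 0
  · -- both ranges are empty (or the clamp makes start = n = 0)
    have h0 : ¬ (0 < n) := by omega
    have hd : pvDcB n 0 = 0 := by rw [pvDcB]; simp [h0]
    rw [hd]
    simp only [mul_zero, sub_zero]
    by_cases hneg : n < 0
    · rw [if_pos hneg, PySem.List.pyRange_one_eq_nil (a := 0) (b := n) (by omega)]
      rfl
    · rw [if_neg hneg]
      have hz : n = 0 := by omega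
      subst hz
      exact pvLoop_eq 0 _
  · replace hn : 0 < n := by omega
    obtain ⟨k, hk, hklt⟩ := pvDc_spec n 0 (by omega)
    have hd0 : pvDcB n 0 = (k : Int) := by rw [hk]; ring
    rw [hd0]
    set start := if n - 9 * (k : Int) < 0 then 0 else n - 9 * (k : Int) with hst
    have hkpos : (0 : Int) ≤ (k : Int) := by positivity
    have hstart_nonneg : 0 ≤ start := by rw [hst]; split_ifs with h <;> omega
    have hstart_le : start ≤ n := by rw [hst]; split_ifs with h <;> omega
    -- no i in [0, start) satisfies digitsum(i) + i = n
    have hno : ∀ i ∈ PySem.List.pyRange 0 start 1, pvDsA i 0 + i ≠ n := by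
      intro i hi
      rw [PySem.List.mem_pyRange_one] at hi
      have hilt : i < (10 : Int) ^ k := by
        calc i < start := hi.2
        _ ≤ n := hstart_le
        _ < (10 : Int) ^ k := hklt
      have hb := pvDs_bound k i 0 hi.1 hilt
      have hstart_le' : start ≤ n - 9 * (k : Int) := by
        rw [hst]; split_ifs with h <;> omega
      omega
    rw [PySem.List.pyRange_one_append 0 start n hstart_nonneg hstart_le,
        pvLoopA_append n _ _ hno]
    exact pvLoop_eq n _
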